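-- pv_equiv track=rewrite | github.com/jsuci/gidapp | swertres/script_search_next.py | digits_match
-- ===== SOURCE A (Python) =====
-- def digits_match(res, combi):
--     """
--     INPUT:
--         res - a string of 3 digit numbers (ex. "123") taken from results_v2.txt
--         combi - a string of 3 digit numbers (ex. "321") taken from the user
--
--     OUTPUT:
--         True or False - return a boolean value. True if all digits match and
--         False if is not
--     """
--
--     for digit in combi:
--         if digit in res:
--             res = res.replace(digit, "", 1)
--
--     if not res:
--         return True
--     else:
--         return False
-- ===== SOURCE B (Python) =====
-- def digits_match(res, combi):
--     cr = {}
--     for c in res: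
--         cr[c] = cr.get(c, 0) + 1
--     cc = {}
--     for c in combi:
--         cc[c] = cc.get(c, 0) + 1
--     return all(cc.get(c, 0) >= n for c, n in cr.items())
-- ===== Notes on version B (the rewrite author's own statement) =====
-- stated objective: faster
-- what changed: Replaces the loop that repeatedly searches combi's digits in res and shrinks res with replace(d,'',1) by building two frequency tables once and checking count-wise that res is a sub-multiset of combi.
import Mathlib
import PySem

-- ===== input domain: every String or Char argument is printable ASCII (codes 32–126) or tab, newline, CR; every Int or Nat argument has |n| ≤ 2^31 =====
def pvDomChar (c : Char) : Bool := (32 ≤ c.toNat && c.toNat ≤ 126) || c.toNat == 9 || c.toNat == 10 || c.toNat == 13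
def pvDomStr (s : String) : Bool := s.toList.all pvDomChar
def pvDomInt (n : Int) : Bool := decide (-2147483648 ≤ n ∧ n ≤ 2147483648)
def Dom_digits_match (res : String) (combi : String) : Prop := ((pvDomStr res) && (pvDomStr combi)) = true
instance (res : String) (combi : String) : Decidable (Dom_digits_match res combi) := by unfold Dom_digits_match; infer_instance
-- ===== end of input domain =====

-- B replaces A's repeated search-and-shrink of res by two frequency tables compared count-wise (idiomatic rewrite).


-- ===== PORT A =====
-- 'digit in res' / 'res.replace(digit, "", 1)': digit is a single character, so the
-- substring test is char membership and the count-1 replace removes the first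
-- occurrence of that char (= List.erase); exact because the pattern has length 1.
def digits_match (res : String) (combi : String) : Bool :=
  (combi.toList.foldl (fun r d => if d ∈ r then r.erase d else r) res.toList).isEmpty

-- ===== PORT B =====
def digits_match_alt (res : String) (combi : String) : Bool :=
  let cr := res.toList.foldl (fun d x => d.insert x (d.getD x 0 + 1)) (PySem.Dict.empty : PySem.Dict Char Int)
  let cc := combi.toList.foldl (fun d x => d.insert x (d.getD x 0 + 1)) (PySem.Dict.empty : PySem.Dict Char Int)
  cr.items.all (fun p => cc.getD p.1 0 ≥ p.2)

-- ===== PRECONDITION & SPEC =====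
def Spec_digits_match (res : String) (combi : String) (out : Bool) : Prop := out = digits_match_alt res combi
instance (res : String) (combi : String) (out : Bool) : Decidable (Spec_digits_match res combi out) := by unfold Spec_digits_match; infer_instance

-- ===== CLAIM (what is proved, stated in full; the proofs are below) =====
def Claim_equal_digits_match : Prop := ∀ (res : String) (combi : String), Dom_digits_match res combi → Spec_digits_match res combi (digits_match res combi)

-- ===== LEMMAS AND PROOFS =====

-- A's loop leaves res empty iff res is a sub-multiset of combi (count-wise).
theorem foldl_erase_empty_iff (combi res : List Char) :
    (combi.foldl (fun r d => if d ∈ r then r.erase d else r) res).isEmpty = true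
      ↔ ∀ d : Char, res.count d ≤ combi.count d := by
  induction combi generalizing res with
  | nil =>
    simp [List.isEmpty_iff, List.eq_nil_iff_forall_not_mem, List.count_eq_zero]
  | cons c cs ih =>
    simp only [List.foldl_cons]
    rw [ih]
    have key : ∀ d : Char,
        ((if c ∈ res then res.erase c else res).count d ≤ cs.count d)
          ↔ res.count d ≤ (c :: cs).count d := by
      intro d
      have hcos : (c :: cs).count d = cs.count d + if c = d then 1 else 0 := by
        simp [List.count_cons]
      by_cases hc : c ∈ res
      · have h1 : 1 ≤ res.count c := List.one_le_count_iff.mpr hc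
        have he : (res.erase c).count d = res.count d - if c = d then 1 else 0 := by
          simp [List.count_erase]
        rw [if_pos hc, he, hcos]
        by_cases hdc : c = d
        · subst hdc; simp
        · simp only [if_neg hdc]; omega
      · rw [if_neg hc, hcos]
        by_cases hdc : c = d
        · subst hdc
          have h0 : res.count c = 0 := List.count_eq_zero.mpr hc
          omega
        · rw [if_neg hdc]; omega
    exact ⟨fun h d => (key d).mp (h d), fun h d => (key d).mpr (h d)⟩

-- B's items.all over the res-counter is the same count-wise comparison.
theorem alt_eq_iff (res combi : String) :
    digits_match_alt res combi = true
      ↔ ∀ d : Char, res.toList.count d ≤ combi.toList.count d := by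
  unfold digits_match_alt
  simp only []
  rw [PySem.Dict.foldl_insert_getD_add_one_eq_counter,
      PySem.Dict.foldl_insert_getD_add_one_eq_counter,
      PySem.Dict.items_counter, List.all_eq_true]
  simp only [List.mem_map, forall_exists_index, and_imp]
  constructor
  · intro h d
    by_cases hd : d ∈ res.toList
    · have := h (d, (res.toList.count d : Int)) d (by simpa [PySem.Set.mem_ofList] using hd) rfl
      simp only [PySem.Dict.getD_counter, ge_iff_le, decide_eq_true_eq] at this
      exact_mod_cast this
    · simp [List.count_eq_zero.mpr hd]
  · intro h p k hk hp
    subst hp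
    simp only [PySem.Dict.getD_counter, ge_iff_le, decide_eq_true_eq]
    exact_mod_cast h k

-- ===== VERDICT (by name: the statement is the Claim_ definition above) =====
theorem digits_match_spec : Claim_equal_digits_match := by
  intro res combi _
  unfold Spec_digits_match digits_match
  rw [Bool.eq_iff_iff, foldl_erase_empty_iff, alt_eq_iff]
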